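-- pv_equiv track=rewrite | github.com/jacobduncan00/dsa | binary-search-questions/mutual-follower.py | solve
-- ===== SOURCE A (Python) =====
-- def solve(relations_list):
--     ans = set()
--     seen = set()
--
--     for a, b in relations_list:
--         seen.add((a, b))
--
--         if (b, a) in seen:
--             ans.add(b)
--             ans.add(a)
--
--     k = list(ans)
--     rtr = sorted(k)
--     return rtr
-- ===== SOURCE B (Python) =====
-- def solve(relations_list):
--     # Group each relation under its sorted (min, max) key with a direction flag;
--     # a key is mutual when both directions occur (or it is a self-relation).
--     dirs = {}
--     for a, b in relations_list:
--         key = (a, b) if a <= b else (b, a)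
--         fw, bw = dirs.get(key, (False, False))
--         dirs[key] = (fw or a <= b, bw or b < a)
--     ans = set()
--     for (u, v), (fw, bw) in dirs.items():
--         if (fw and bw) or u == v:
--             ans.add(u)
--             ans.add(v)
--     return sorted(ans)
-- ===== Notes on version B (the rewrite author's own statement) =====
-- stated objective: alternative
-- what changed: A scans pairs once testing each pair's reverse against an incrementally built seen-set; B instead groups relations in a dict keyed by the sorted (min,max) pair with two direction flags, then emits users of keys that carry both directions (or are self-relations) — no reverse-membership test at all.
import Mathlib
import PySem

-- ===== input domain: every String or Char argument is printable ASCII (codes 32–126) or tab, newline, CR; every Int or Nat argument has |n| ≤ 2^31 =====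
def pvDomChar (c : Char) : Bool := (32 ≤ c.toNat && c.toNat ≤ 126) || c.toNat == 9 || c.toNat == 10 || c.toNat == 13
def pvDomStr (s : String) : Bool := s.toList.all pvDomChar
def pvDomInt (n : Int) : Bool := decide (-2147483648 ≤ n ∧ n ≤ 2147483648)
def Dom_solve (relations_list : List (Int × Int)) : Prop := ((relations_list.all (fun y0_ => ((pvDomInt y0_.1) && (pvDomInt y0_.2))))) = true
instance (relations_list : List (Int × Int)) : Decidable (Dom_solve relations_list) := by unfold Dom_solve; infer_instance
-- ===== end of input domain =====

-- B replaces A's reverse-membership scan by grouping relations in a dict keyed by the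
-- sorted (min,max) pair with two direction flags, then emitting users of keys seen in
-- both directions (or self-relations); same cost, genuinely different algorithm.

-- ===== PORT A =====
-- the loop body: seen.add((a,b)); if (b,a) in seen: ans.add(b); ans.add(a)
def solveStep (s : PySem.Set Int × PySem.Set (Int × Int)) (p : Int × Int) :
    PySem.Set Int × PySem.Set (Int × Int) :=
  let seen := PySem.Set.add s.2 p
  if PySem.Set.contains seen (p.2, p.1) then
    (PySem.Set.add (PySem.Set.add s.1 p.2) p.1, seen)
  else (s.1, seen)

def solve (relations_list : List (Int × Int)) : List Int :=
  let st := relations_list.foldl solveStep (PySem.Set.empty, PySem.Set.empty)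
  PySem.List.sorted st.1 (fun x => x)

-- ===== PORT B =====
-- the first loop's body: key = (a,b) if a<=b else (b,a); fw,bw = dirs.get(key,(False,False));
-- dirs[key] = (fw or a<=b, bw or b<a)
def altStep (d : PySem.Dict (Int × Int) (Bool × Bool)) (p : Int × Int) :
    PySem.Dict (Int × Int) (Bool × Bool) :=
  let key := if p.1 ≤ p.2 then (p.1, p.2) else (p.2, p.1)
  let fb := d.getD key (false, false)
  d.insert key (fb.1 || decide (p.1 ≤ p.2), fb.2 || decide (p.2 < p.1))

-- second loop: for (u,v),(fw,bw) in dirs.items(): if (fw and bw) or u == v: ans.add(u); ans.add(v)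
def solve_alt (relations_list : List (Int × Int)) : List Int :=
  let dirs := relations_list.foldl altStep PySem.Dict.empty
  let ans : PySem.Set Int :=
    dirs.items.foldl (fun s kv =>
      if (kv.2.1 && kv.2.2) || decide (kv.1.1 = kv.1.2)
      then PySem.Set.add (PySem.Set.add s kv.1.1) kv.1.2 else s)
      PySem.Set.empty
  PySem.List.sorted ans (fun x => x)

-- ===== PRECONDITION & SPEC =====
def Spec_solve (relations_list : List (Int × Int)) (out : List Int) : Prop := out = solve_alt relations_list
instance (relations_list : List (Int × Int)) (out : List Int) : Decidable (Spec_solve relations_list out) := by unfold Spec_solve; infer_instance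

-- ===== CLAIM (what is proved, stated in full; the proofs are below) =====
def Claim_equal_solve : Prop := ∀ (relations_list : List (Int × Int)), Dom_solve relations_list → Spec_solve relations_list (solve relations_list)

-- ===== LEMMAS AND PROOFS =====

-- A's invariant: after folding L from the empty state, seen = set(L), and
-- ans holds exactly the ends of pairs whose reverse also occurs in L; ans stays Nodup.
theorem solveA_inv (L : List (Int × Int)) :
    (L.foldl solveStep (PySem.Set.empty, PySem.Set.empty)).2 = PySem.Set.ofList L ∧
    (L.foldl solveStep (PySem.Set.empty, PySem.Set.empty)).1.Nodup ∧
    (∀ x : Int, x ∈ (L.foldl solveStep (PySem.Set.empty, PySem.Set.empty)).1 ↔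
      ∃ a b : Int, (a, b) ∈ L ∧ (b, a) ∈ L ∧ (x = a ∨ x = b)) := by
  induction L using List.reverseRecOn with
  | nil =>
    refine ⟨rfl, List.nodup_nil, ?_⟩
    simp [PySem.Set.empty]
  | append_singleton L p ih =>
    obtain ⟨hseen, hnd, hmem⟩ := ih
    rw [List.foldl_append]
    obtain ⟨a, b⟩ := p
    constructor
    · simp only [List.foldl_cons, List.foldl_nil, solveStep, hseen]
      have : PySem.Set.ofList (L ++ [(a, b)]) = PySem.Set.add (PySem.Set.ofList L) (a, b) := by
        simp [PySem.Set.ofList_eq_foldl, List.foldl_append]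
      rw [this]
      split <;> rfl
    · simp only [List.foldl_cons, List.foldl_nil, solveStep, hseen]
      by_cases hrev : PySem.Set.contains (PySem.Set.add (PySem.Set.ofList L) (a, b)) (b, a) = true
      · simp only [hrev, if_pos]
        have hrev' : (b, a) ∈ L ∨ b = a := by
          rcases (PySem.Set.contains_iff _ _).mp hrev with h
          rcases (PySem.Set.mem_add _ _ _).mp h with h | h
          · exact Or.inl ((PySem.Set.mem_ofList _ _).mp h)
          · exact Or.inr (congrArg Prod.fst h)
        refine ⟨PySem.Set.nodup_add _ _ (PySem.Set.nodup_add _ _ hnd), ?_⟩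
        intro x
        rw [PySem.Set.mem_add, PySem.Set.mem_add, hmem]
        constructor
        · rintro ((⟨c, d, hcd, hdc, hx⟩ | hxb) | hxa)
          · exact ⟨c, d, List.mem_append_left _ hcd, List.mem_append_left _ hdc, hx⟩
          · refine ⟨a, b, List.mem_append_right _ (List.mem_singleton_self _), ?_, Or.inr hxb⟩
            rcases hrev' with h | h
            · exact List.mem_append_left _ h
            · subst h; exact List.mem_append_right _ (List.mem_singleton_self _)
          · refine ⟨a, b, List.mem_append_right _ (List.mem_singleton_self _), ?_, Or.inl hxa⟩
            rcases hrev' with h | h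
            · exact List.mem_append_left _ h
            · subst h; exact List.mem_append_right _ (List.mem_singleton_self _)
        · rintro ⟨c, d, hcd, hdc, hx⟩
          rcases List.mem_append.mp hcd with hcd | hcd
          · rcases List.mem_append.mp hdc with hdc | hdc
            · exact Or.inl (Or.inl ⟨c, d, hcd, hdc, hx⟩)
            · -- (d, c) = (a, b): so c = b, d = a, x = b ∨ x = a
              have hda : d = a ∧ c = b := by
                have := List.mem_singleton.mp hdc; exact ⟨by injection this, by injection this⟩
              rcases hx with hx | hx
              · exact Or.inl (Or.inr (hx.trans hda.2))
              · exact Or.inr (hx.trans hda.1)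
          · -- (c, d) = (a, b)
            have hca : c = a ∧ d = b := by
              have := List.mem_singleton.mp hcd; exact ⟨by injection this, by injection this⟩
            rcases hx with hx | hx
            · exact Or.inr (hx.trans hca.1)
            · exact Or.inl (Or.inr (hx.trans hca.2))
      · simp only [hrev, if_neg, Bool.not_eq_true]
        refine ⟨hnd, ?_⟩
        have hrev' : (b, a) ∉ L ∧ b ≠ a := by
          constructor
          · intro h
            exact hrev ((PySem.Set.contains_iff _ _).mpr
              ((PySem.Set.mem_add _ _ _).mpr (Or.inl ((PySem.Set.mem_ofList _ _).mpr h))))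
          · intro h
            exact hrev ((PySem.Set.contains_iff _ _).mpr
              ((PySem.Set.mem_add _ _ _).mpr (Or.inr (by rw [h]))))
        intro x
        rw [hmem]
        constructor
        · rintro ⟨c, d, hcd, hdc, hx⟩
          exact ⟨c, d, List.mem_append_left _ hcd, List.mem_append_left _ hdc, hx⟩
        · rintro ⟨c, d, hcd, hdc, hx⟩
          rcases List.mem_append.mp hcd with hcd | hcd
          · rcases List.mem_append.mp hdc with hdc | hdc
            · exact ⟨c, d, hcd, hdc, hx⟩
            · have : d = a ∧ c = b := by
                have := List.mem_singleton.mp hdc; exact ⟨by injection this, by injection this⟩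
              exact absurd (this.2 ▸ this.1 ▸ hcd) hrev'.1
          · have hca : c = a ∧ d = b := by
              have := List.mem_singleton.mp hcd; exact ⟨by injection this, by injection this⟩
            rcases List.mem_append.mp hdc with hdc | hdc
            · exact absurd (hca.1 ▸ hca.2 ▸ hdc) hrev'.1
            · have : d = a := by have := List.mem_singleton.mp hdc; injection this
              exact absurd (hca.2.symm.trans this) hrev'.2

-- B's dict invariant: keys are Nodup and normalized, and a normalized key's entry
-- records exactly which directions of that unordered pair occur in the processed list.
theorem dirs_inv (L : List (Int × Int)) :
    (L.foldl altStep PySem.Dict.empty).keys.Nodup ∧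
    (∀ k ∈ (L.foldl altStep PySem.Dict.empty).keys, k.1 ≤ k.2) ∧
    (∀ u v : Int, u ≤ v →
      (L.foldl altStep PySem.Dict.empty).get? (u, v) =
        if (u, v) ∈ L ∨ (u < v ∧ (v, u) ∈ L)
        then some (decide ((u, v) ∈ L), decide (u < v ∧ (v, u) ∈ L)) else none) := by
  induction L using List.reverseRecOn with
  | nil =>
    refine ⟨by simp [PySem.Dict.keys_empty], by simp [PySem.Dict.keys_empty], ?_⟩
    intro u v _
    simp [PySem.Dict.get?_empty]
  | append_singleton L p ih =>
    obtain ⟨hnd, hnorm, hget⟩ := ih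
    obtain ⟨a, b⟩ := p
    rw [List.foldl_append]
    simp only [List.foldl_cons, List.foldl_nil]
    set d := L.foldl altStep PySem.Dict.empty with hd
    have hkey : (altStep d (a, b)) =
        d.insert (if a ≤ b then (a, b) else (b, a))
          ((d.getD (if a ≤ b then (a, b) else (b, a)) (false, false)).1 || decide (a ≤ b),
           (d.getD (if a ≤ b then (a, b) else (b, a)) (false, false)).2 || decide (b < a)) := rfl
    rw [hkey]
    -- getD at a normalized key, phrased through the induction hypothesis
    have hfbGen : ∀ u v : Int, u ≤ v →
        d.getD (u, v) (false, false) =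
          (decide ((u, v) ∈ L), decide (u < v ∧ (v, u) ∈ L)) ∨
        (d.getD (u, v) (false, false) = (false, false) ∧
          ¬((u, v) ∈ L ∨ (u < v ∧ (v, u) ∈ L))) := by
      intro u v huv
      have := hget u v huv
      by_cases hc : (u, v) ∈ L ∨ (u < v ∧ (v, u) ∈ L)
      · rw [if_pos hc] at this
        exact Or.inl (by rw [PySem.Dict.getD_eq_get?_getD, this]; rfl)
      · rw [if_neg hc] at this
        exact Or.inr ⟨by rw [PySem.Dict.getD_eq_get?_getD, this]; rfl, hc⟩
    refine ⟨?_, ?_, ?_⟩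
    · exact PySem.Dict.nodup_keys_insert _ _ _ hnd
    · intro k hk
      rcases (PySem.Dict.mem_keys_insert _ _ _ _).mp hk with hk | hk
      · subst hk; split <;> simp <;> omega
      · exact hnorm k hk
    · intro u v huv
      rw [PySem.Dict.get?_insert]
      by_cases hab : a ≤ b
      · simp only [if_pos hab] at *
        by_cases heq : (u, v) = (a, b)
        · obtain ⟨rfl, rfl⟩ := Prod.ext_iff.mp heq
          have hpres : (u, v) ∈ L ++ [(u, v)] :=
            List.mem_append_right _ (List.mem_singleton_self _)
          rw [if_pos rfl, if_pos (Or.inl hpres)]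
          have hnvu : decide (v < u) = false := decide_eq_false (by omega)
          have hc1 : decide ((u, v) ∈ L ++ [(u, v)]) = true := decide_eq_true hpres
          have hc2 : (u < v ∧ (v, u) ∈ L ++ [(u, v)]) ↔ (u < v ∧ (v, u) ∈ L) := by
            constructor
            · rintro ⟨hlt, hm⟩
              rcases List.mem_append.mp hm with hm | hm
              · exact ⟨hlt, hm⟩
              · have : v = u := by
                  have := List.mem_singleton.mp hm; injection this
                exact absurd (this ▸ hlt) (lt_irrefl _)
            · rintro ⟨hlt, hm⟩; exact ⟨hlt, List.mem_append_left _ hm⟩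
          rcases hfbGen u v huv with hfb | ⟨hfb, hnc⟩ <;> rw [hfb] <;>
            simp only [Option.some.injEq, Prod.mk.injEq] <;> refine ⟨?_, ?_⟩
          · simp [hab, hpres]
          · rw [hnvu, Bool.or_false, decide_eq_decide]; exact hc2.symm
          · simp [hab, hpres]
          · rw [hnvu, Bool.or_false]
            have : ¬(u < v ∧ (v, u) ∈ L ++ [(u, v)]) := fun h => hnc (Or.inr (hc2.mp h))
            exact (decide_eq_false this).symm
        · rw [if_neg heq, hget u v huv]
          have c1 : ((u, v) ∈ L ++ [(a, b)]) ↔ (u, v) ∈ L := by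
            simp only [List.mem_append, List.mem_singleton]
            exact ⟨fun h => h.resolve_right (fun h' => heq h'), Or.inl⟩
          have c2 : (u < v ∧ (v, u) ∈ L ++ [(a, b)]) ↔ (u < v ∧ (v, u) ∈ L) := by
            constructor
            · rintro ⟨hlt, hm⟩
              rcases List.mem_append.mp hm with hm | hm
              · exact ⟨hlt, hm⟩
              · have hva : v = a ∧ u = b := by
                  have := List.mem_singleton.mp hm
                  exact ⟨by injection this, by injection this⟩
                exfalso; obtain ⟨rfl, rfl⟩ := hva; omega
            · rintro ⟨hlt, hm⟩; exact ⟨hlt, List.mem_append_left _ hm⟩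
          simp only [c1, c2]
      · -- b < a, key = (b, a)
        have hba : b < a := by omega
        simp only [if_neg hab] at *
        by_cases heq : (u, v) = (b, a)
        · obtain ⟨rfl, rfl⟩ := Prod.ext_iff.mp heq
          have hpres : (v, u) ∈ L ++ [(v, u)] :=
            List.mem_append_right _ (List.mem_singleton_self _)
          rw [if_pos rfl, if_pos (Or.inr ⟨hba, hpres⟩)]
          have hnle : decide (u ≤ v) = true := decide_eq_true (le_of_lt hba)
          have hc1 : ((u, v) ∈ L ++ [(v, u)]) ↔ (u, v) ∈ L := by
            simp only [List.mem_append, List.mem_singleton, Prod.mk.injEq]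
            constructor
            · rintro (h | ⟨h1, h2⟩)
              · exact h
              · exfalso; omega
            · exact Or.inl
          have hc2 : decide (u < v ∧ (v, u) ∈ L ++ [(v, u)]) = true :=
            decide_eq_true ⟨hba, hpres⟩
          have hnab : decide (v ≤ u) = false := decide_eq_false hab
          have hdba : decide (u < v) = true := decide_eq_true hba
          rcases hfbGen u v (le_of_lt hba) with hfb | ⟨hfb, hnc⟩ <;> rw [hfb] <;>
            simp only [Option.some.injEq, Prod.mk.injEq] <;> refine ⟨?_, ?_⟩
          · rw [hnab, Bool.or_false, decide_eq_decide]; exact hc1.symm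
          · rw [hdba, Bool.or_true, hc2]
          · rw [hnab, Bool.or_false]
            have hul : (u, v) ∉ L := fun h => hnc (Or.inl h)
            have h' : ¬((u, v) ∈ L ++ [(v, u)]) := fun h => hul (hc1.mp h)
            exact (decide_eq_false h').symm
          · rw [hdba, Bool.or_true, hc2]
        · rw [if_neg heq, hget u v huv]
          have c1 : ((u, v) ∈ L ++ [(a, b)]) ↔ (u, v) ∈ L := by
            simp only [List.mem_append, List.mem_singleton, Prod.mk.injEq]
            constructor
            · rintro (h | ⟨h1, h2⟩)
              · exact h
              · exfalso; omega
            · exact Or.inl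
          have c2 : (u < v ∧ (v, u) ∈ L ++ [(a, b)]) ↔ (u < v ∧ (v, u) ∈ L) := by
            constructor
            · rintro ⟨hlt, hm⟩
              rcases List.mem_append.mp hm with hm | hm
              · exact ⟨hlt, hm⟩
              · have hva : v = a ∧ u = b := by
                  have := List.mem_singleton.mp hm
                  exact ⟨by injection this, by injection this⟩
                exact absurd (by rw [hva.2, hva.1]) heq
            · rintro ⟨hlt, hm⟩; exact ⟨hlt, List.mem_append_left _ hm⟩
          simp only [c1, c2]

-- B's second loop over the items list, with a generalized accumulator.
theorem ansFold_inv (M : List ((Int × Int) × (Bool × Bool))) (s : PySem.Set Int)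
    (hnd : s.Nodup) :
    (M.foldl (fun s kv =>
        if (kv.2.1 && kv.2.2) || decide (kv.1.1 = kv.1.2)
        then PySem.Set.add (PySem.Set.add s kv.1.1) kv.1.2 else s) s).Nodup ∧
    (∀ x : Int, x ∈ (M.foldl (fun s kv =>
        if (kv.2.1 && kv.2.2) || decide (kv.1.1 = kv.1.2)
        then PySem.Set.add (PySem.Set.add s kv.1.1) kv.1.2 else s) s) ↔
      x ∈ s ∨ ∃ kv ∈ M, ((kv.2.1 && kv.2.2) || decide (kv.1.1 = kv.1.2)) = true ∧
        (x = kv.1.1 ∨ x = kv.1.2)) := by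
  induction M generalizing s with
  | nil => simpa using hnd
  | cons kv M ih =>
    simp only [List.foldl_cons]
    by_cases hc : ((kv.2.1 && kv.2.2) || decide (kv.1.1 = kv.1.2)) = true
    · simp only [hc, if_pos]
      obtain ⟨hnd2, hm⟩ := ih (PySem.Set.add (PySem.Set.add s kv.1.1) kv.1.2)
        (PySem.Set.nodup_add _ _ (PySem.Set.nodup_add _ _ hnd))
      refine ⟨hnd2, fun x => ?_⟩
      rw [hm, PySem.Set.mem_add, PySem.Set.mem_add]
      constructor
      · rintro (((hs | h1) | h2) | ⟨kv', hkv', hc', hx⟩)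
        · exact Or.inl hs
        · exact Or.inr ⟨kv, List.mem_cons_self, hc, Or.inl h1⟩
        · exact Or.inr ⟨kv, List.mem_cons_self, hc, Or.inr h2⟩
        · exact Or.inr ⟨kv', List.mem_cons_of_mem _ hkv', hc', hx⟩
      · rintro (hs | ⟨kv', hkv', hc', hx⟩)
        · exact Or.inl (Or.inl (Or.inl hs))
        · rcases List.mem_cons.mp hkv' with hkv' | hkv'
          · subst hkv'
            rcases hx with hx | hx
            · exact Or.inl (Or.inl (Or.inr hx))
            · exact Or.inl (Or.inr hx)
          · exact Or.inr ⟨kv', hkv', hc', hx⟩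
    · simp only [hc, if_neg, Bool.not_eq_true]
      obtain ⟨hnd2, hm⟩ := ih s hnd
      refine ⟨hnd2, fun x => ?_⟩
      rw [hm]
      constructor
      · rintro (hs | ⟨kv', hkv', hc', hx⟩)
        · exact Or.inl hs
        · exact Or.inr ⟨kv', List.mem_cons_of_mem _ hkv', hc', hx⟩
      · rintro (hs | ⟨kv', hkv', hc', hx⟩)
        · exact Or.inl hs
        · rcases List.mem_cons.mp hkv' with hkv' | hkv'
          · subst hkv'; exact absurd hc' hc
          · exact Or.inr ⟨kv', hkv', hc', hx⟩

-- ===== VERDICT (by name: the statement is the Claim_ definition above) =====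
theorem solve_spec : Claim_equal_solve := by
  intro L _
  unfold Spec_solve solve solve_alt
  obtain ⟨_, hndA, hmemA⟩ := solveA_inv L
  obtain ⟨hndK, hnorm, hget⟩ := dirs_inv L
  obtain ⟨hndB, hmemB⟩ := ansFold_inv (L.foldl altStep PySem.Dict.empty).items
    PySem.Set.empty List.nodup_nil
  apply PySem.List.sorted_eq_sorted_of_perm _ _ _ (fun _ _ h => h)
  rw [List.perm_ext_iff_of_nodup hndA hndB]
  intro x
  rw [hmemA, hmemB]
  set d := L.foldl altStep PySem.Dict.empty with hd
  constructor
  · rintro ⟨a, b, h1, h2, hx⟩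
    refine Or.inr ?_
    by_cases hab : a ≤ b
    · have hpres : (a, b) ∈ L ∨ (a < b ∧ (b, a) ∈ L) := Or.inl h1
      have := hget a b hab
      rw [if_pos hpres] at this
      refine ⟨((a, b), (decide ((a, b) ∈ L), decide (a < b ∧ (b, a) ∈ L))),
        (PySem.Dict.get?_eq_some_iff_mem_items _ _ _ hndK).mp this, ?_, hx⟩
      by_cases hlt : a < b
      · simp [h1, hlt, h2]
      · have : a = b := by omega
        simp [this]
    · have hba : b < a := by omega
      have hpres : (b, a) ∈ L ∨ (b < a ∧ (a, b) ∈ L) := Or.inl h2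
      have := hget b a (le_of_lt hba)
      rw [if_pos hpres] at this
      refine ⟨((b, a), (decide ((b, a) ∈ L), decide (b < a ∧ (a, b) ∈ L))),
        (PySem.Dict.get?_eq_some_iff_mem_items _ _ _ hndK).mp this, ?_, ?_⟩
      · simp [h2, hba, h1]
      · rcases hx with hx | hx
        · exact Or.inr hx
        · exact Or.inl hx
  · rintro (h | ⟨kv, hkv, hc, hx⟩)
    · simp [PySem.Set.empty] at h
    · obtain ⟨⟨u, v⟩, fw, bw⟩ := kv
      have huv : u ≤ v := hnorm (u, v) (PySem.Dict.mem_keys_of_mem_items _ hkv)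
      have hsome : d.get? (u, v) = some (fw, bw) :=
        (PySem.Dict.get?_eq_some_iff_mem_items _ _ _ hndK).mpr hkv
      have := hget u v huv
      by_cases hpres : (u, v) ∈ L ∨ (u < v ∧ (v, u) ∈ L)
      · rw [if_pos hpres, hsome] at this
        have hfw : fw = decide ((u, v) ∈ L) := congrArg Prod.fst (Option.some.inj this)
        have hbw : bw = decide (u < v ∧ (v, u) ∈ L) := congrArg Prod.snd (Option.some.inj this)
        simp only [Bool.or_eq_true, Bool.and_eq_true, decide_eq_true_eq] at hc
        rcases hc with ⟨hf, hb⟩ | huvv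
        · rw [hfw] at hf; rw [hbw] at hb
          simp only [decide_eq_true_eq] at hf hb
          exact ⟨u, v, hf, hb.2, hx⟩
        · subst huvv
          have hmemL : (u, u) ∈ L := by
            rcases hpres with h | ⟨h, _⟩
            · exact h
            · exact absurd h (lt_irrefl _)
          exact ⟨u, u, hmemL, hmemL, by tauto⟩
      · rw [if_neg hpres, hsome] at this
        exact absurd this (by simp)
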